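-- pv_equiv track=rewrite | github.com/EliasNsilva/evolutionary-computation | ab1/expression/expression/8queens_evo.py | getFitness
-- ===== SOURCE A (Python) =====
-- def getFitness(instance): #Criando fitness
--     clashes = 0
--     for i in range(len(instance) - 1):
--         for j in range(i + 1, len(instance)):
--             if instance[i] == instance[j]:
--                 clashes += 1
--     for i in range(len(instance) - 1):
--         for j in range(i + 1, len(instance)):
--             if abs(instance[j] - instance[i]) == abs(j - i):
--                 clashes += 1
--     return 28 - clashes
-- ===== SOURCE B (Python) =====
-- def getFitness(instance):
--     clashes = 0
--     for keys in (instance,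
--                  [v - i for i, v in enumerate(instance)],
--                  [v + i for i, v in enumerate(instance)]):
--         counts = {}
--         for k in keys:
--             counts[k] = counts.get(k, 0) + 1
--         for c in counts.values():
--             clashes += c * (c - 1) // 2
--     return 28 - clashes
-- ===== Notes on version B (the rewrite author's own statement) =====
-- stated objective: faster
-- what changed: Replaces the two O(n^2) all-pairs scans by hash-counting: one pass builds counters for the values and for the two diagonal keys v-i and v+i, and clashes is the sum of c*(c-1)//2 over the counts.
import Mathlib
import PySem

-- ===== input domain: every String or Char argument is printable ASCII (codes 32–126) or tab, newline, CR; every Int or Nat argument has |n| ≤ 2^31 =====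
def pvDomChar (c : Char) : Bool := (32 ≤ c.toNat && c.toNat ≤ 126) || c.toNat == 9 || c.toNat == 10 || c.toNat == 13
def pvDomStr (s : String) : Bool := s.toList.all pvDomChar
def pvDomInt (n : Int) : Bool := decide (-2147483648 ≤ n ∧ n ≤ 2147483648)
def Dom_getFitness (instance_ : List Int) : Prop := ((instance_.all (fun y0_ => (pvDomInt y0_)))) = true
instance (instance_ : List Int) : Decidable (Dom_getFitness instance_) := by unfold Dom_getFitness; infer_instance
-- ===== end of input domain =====

-- B replaces A's two O(n^2) all-pairs scans by one-pass hash counting of the values and the two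
-- diagonal keys v-i and v+i, summing c*(c-1)//2 over the counts (objective: faster, asymptotic).

-- ===== PORT A =====
def getFitness (instance_ : List Int) : Int :=
  let clashes1 : Int :=
    (PySem.List.pyRange 0 (PySem.List.len instance_ - 1) 1).foldl (fun c i =>
      (PySem.List.pyRange (i + 1) (PySem.List.len instance_) 1).foldl (fun c j =>
        if PySem.List.pyGetD instance_ i 0 == PySem.List.pyGetD instance_ j 0 then c + 1 else c) c) 0
  let clashes2 : Int :=
    (PySem.List.pyRange 0 (PySem.List.len instance_ - 1) 1).foldl (fun c i =>
      (PySem.List.pyRange (i + 1) (PySem.List.len instance_) 1).foldl (fun c j =>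
        if |PySem.List.pyGetD instance_ j 0 - PySem.List.pyGetD instance_ i 0| == |j - i| then c + 1 else c) c) clashes1
  28 - clashes2

-- ===== PORT B =====
-- counts[k] = counts.get(k, 0) + 1 loop, then 'for c in counts.values(): clashes += c*(c-1)//2'
def pvC2Sum (clashes : Int) (keys : List Int) : Int :=
  let counts : PySem.Dict Int Int :=
    keys.foldl (fun d k => d.insert k (d.getD k 0 + 1)) PySem.Dict.empty
  counts.values.foldl (fun c v => c + PySem.Int.floordiv (v * (v - 1)) 2) clashes

def getFitness_alt (instance_ : List Int) : Int :=
  let clashes : Int :=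
    [instance_,
     (PySem.List.enumerate instance_ 0).map (fun p => p.2 - p.1),
     (PySem.List.enumerate instance_ 0).map (fun p => p.2 + p.1)].foldl pvC2Sum 0
  28 - clashes

-- ===== PRECONDITION & SPEC =====
def Spec_getFitness (instance_ : List Int) (out : Int) : Prop := out = getFitness_alt instance_
instance (instance_ : List Int) (out : Int) : Decidable (Spec_getFitness instance_ out) := by unfold Spec_getFitness; infer_instance

-- ===== CLAIM (what is proved, stated in full; the proofs are below) =====
def Claim_equal_getFitness : Prop := ∀ (instance_ : List Int), Dom_getFitness instance_ → Spec_getFitness instance_ (getFitness instance_)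

-- ===== LEMMAS AND PROOFS =====

-- number of ordered pairs i < j (by position) in ps with R ps[i] ps[j]
def pcR (R : Int × Int → Int × Int → Bool) : List (Int × Int) → Nat
  | [] => 0
  | p :: ps => ps.countP (R p) + pcR R ps

-- number of positions pairs i < j with equal values
def pcEq : List Int → Nat
  | [] => 0
  | x :: xs => xs.count x + pcEq xs

def C2n (m : Nat) : Nat := m * (m - 1) / 2

lemma C2n_succ (c : Nat) : C2n (c + 1) = c + C2n c := by
  cases c with
  | zero => decide
  | succ k =>
    obtain ⟨m, hm⟩ := Nat.even_mul_succ_self (k+1)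
    obtain ⟨m2, hm2⟩ := Nat.even_mul_succ_self k
    unfold C2n
    have h1 : (k+1+1) * (k+1+1-1) = (k+1)*(k+1+1) := by rw [Nat.add_sub_cancel]; ring
    have h2 : (k+1) * (k+1-1) = k*(k+1) := by rw [Nat.add_sub_cancel]; ring
    have h3 : (k+1)*(k+1+1) = k*(k+1) + 2*(k+1) := by ring
    omega


lemma pcR_short (R : Int × Int → Int × Int → Bool) (ps : List (Int × Int)) (h : ps.length ≤ 1) :
    pcR R ps = 0 := by
  match ps, h with
  | [], _ => rfl
  | [p], _ => simp [pcR]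


lemma countP_or_disjoint {α : Type} (l : List α) (p q r : α → Bool)
    (h : ∀ a ∈ l, r a = (p a || q a) ∧ ¬(p a = true ∧ q a = true)) :
    l.countP r = l.countP p + l.countP q := by
  induction l with
  | nil => simp
  | cons a l ih =>
    have ha := h a (by simp)
    have hl := ih (fun b hb => h b (by simp [hb]))
    simp only [List.countP_cons, hl, ha.1]
    rcases hp : p a <;> rcases hq : q a <;> simp_all <;> omega


lemma countP_range_drop (xs : List Int) (P : Int × Int → Bool) (k : Nat) (hk : k ≤ xs.length) :
    (PySem.List.pyRange (k : Int) (PySem.List.len xs) 1).countP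
      (fun j => P (j, PySem.List.pyGetD xs j 0))
    = ((PySem.List.enumerate xs 0).drop k).countP P := by
  rw [PySem.List.enumerate_eq_map_pyRange xs 0, ← List.map_drop]
  rw [PySem.List.pyRange_one_append 0 (k : Int) (PySem.List.len xs) (by positivity)
      (by rw [PySem.List.len_eq]; exact_mod_cast hk)]
  have hlen : (PySem.List.pyRange 0 (k : Int) 1).length = k := by
    rw [PySem.List.length_pyRange_one]; omega
  rw [List.drop_left' hlen, List.countP_map]
  rfl


lemma bridge (xs : List Int) (R : Int × Int → Int × Int → Bool) :
    ∀ (fuel k : Nat) (c0 : Int), xs.length ≤ fuel + k →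
    (PySem.List.pyRange (k : Int) (PySem.List.len xs - 1) 1).foldl (fun c i =>
      (PySem.List.pyRange (i + 1) (PySem.List.len xs) 1).foldl (fun c j =>
        if R (i, PySem.List.pyGetD xs i 0) (j, PySem.List.pyGetD xs j 0) then c + 1 else c) c) c0
    = c0 + (pcR R ((PySem.List.enumerate xs 0).drop k) : Int) := by
  intro fuel
  induction fuel with
  | zero =>
    intro k c0 hk
    rw [PySem.List.pyRange_one_eq_nil (by rw [PySem.List.len_eq]; omega)]
    rw [List.drop_eq_nil_of_le (by rw [PySem.List.length_enumerate]; omega)]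
    simp [pcR]
  | succ fuel ih =>
    intro k c0 hk
    by_cases h : (k : Int) < PySem.List.len xs - 1
    · have hklen : k + 1 < xs.length := by rw [PySem.List.len_eq] at h; omega
      rw [PySem.List.pyRange_one_cons h]
      rw [List.foldl_cons]
      -- inner fold at i = k
      rw [PySem.List.foldl_if_add_one (fun j => R ((k : Int), PySem.List.pyGetD xs (k : Int) 0)
            (j, PySem.List.pyGetD xs j 0)) _ c0]
      have hcast : ((k : Int) + 1) = ((k + 1 : Nat) : Int) := by push_cast; ring
      rw [hcast, countP_range_drop xs _ (k+1) (by omega), ih (k+1) _ (by omega)]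
      -- now fold the pcR head back
      have hd : (PySem.List.enumerate xs 0).drop k
          = ((k : Int), xs[k]'(by omega)) :: (PySem.List.enumerate xs 0).drop (k + 1) := by
        rw [List.drop_eq_getElem_cons (by rw [PySem.List.length_enumerate]; omega)]
        rw [PySem.List.getElem_enumerate]
        norm_num
      rw [hd]
      show _ = c0 + ((_ + pcR R _ : Nat) : Int)
      have hget : PySem.List.pyGetD xs (k : Int) 0 = xs[k]'(by omega) := by
        rw [PySem.List.pyGetD_natCast, List.getD_eq_getElem?_getD, List.getElem?_eq_getElem (by omega)]
        rfl
      rw [hget]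
      push_cast
      ring
    · rw [PySem.List.pyRange_one_eq_nil (by omega)]
      have h2 : ((PySem.List.enumerate xs 0).drop k).length ≤ 1 := by
        rw [List.length_drop, PySem.List.length_enumerate]
        rw [PySem.List.len_eq] at h
        omega
      rw [pcR_short R _ h2]
      simp


lemma pcR_eq_eq_pcEq (xs : List Int) : ∀ s : Int,
    pcR (fun p q => p.2 == q.2) (PySem.List.enumerate xs s) = pcEq xs := by
  induction xs with
  | nil => intro s; rfl
  | cons x xs ih =>
    intro s
    rw [PySem.List.enumerate_cons]
    show (PySem.List.enumerate xs (s+1)).countP (fun q => x == q.2) + _ = _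
    have h1 : xs.countP (fun y => x == y)
        = (PySem.List.enumerate xs (s+1)).countP (fun q => x == q.2) := by
      conv_lhs => rw [← PySem.List.map_snd_enumerate xs (s+1)]
      rw [List.countP_map]
      rfl
    have h2 : xs.countP (fun y => x == y) = xs.count x := by
      rw [List.count]
      congr 1
      funext y
      rw [Bool.eq_iff_iff]
      constructor <;> intro hh <;> (simp only [beq_iff_eq] at hh ⊢; omega)
    rw [← h1, h2, ih]
    rfl


lemma pcR_diag_eq (xs : List Int) : ∀ s : Int,
    pcR (fun p q => |q.2 - p.2| == |q.1 - p.1|) (PySem.List.enumerate xs s)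
    = pcEq ((PySem.List.enumerate xs s).map (fun p => p.2 - p.1))
      + pcEq ((PySem.List.enumerate xs s).map (fun p => p.2 + p.1)) := by
  induction xs with
  | nil => intro s; rfl
  | cons x xs ih =>
    intro s
    rw [PySem.List.enumerate_cons, List.map_cons, List.map_cons]
    show (PySem.List.enumerate xs (s+1)).countP (fun q => |q.2 - x| == |q.1 - s|)
        + pcR _ (PySem.List.enumerate xs (s+1)) = _
    have hsplit : (PySem.List.enumerate xs (s+1)).countP (fun q => |q.2 - x| == |q.1 - s|)
        = (PySem.List.enumerate xs (s+1)).countP (fun q => q.2 - q.1 == x - s)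
          + (PySem.List.enumerate xs (s+1)).countP (fun q => q.2 + q.1 == x + s) := by
      apply countP_or_disjoint
      intro a ha
      obtain ⟨k, hk, rfl⟩ := (PySem.List.mem_enumerate_iff xs (s+1) a).1 ha
      have hgt : s + 1 + (k : Int) > s := by omega
      constructor
      · rw [Bool.eq_iff_iff]
        simp only [beq_iff_eq, Bool.or_eq_true]
        rw [abs_of_nonneg (by omega : (0:Int) ≤ s + 1 + (k:Int) - s), abs_eq (by omega : (0:Int) ≤ s + 1 + (k:Int) - s)]
        constructor
        · rintro (h | h) <;> [left; right] <;> omega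
        · rintro (h | h) <;> [left; right] <;> omega
      · rintro ⟨h1, h2⟩
        simp only [beq_iff_eq] at h1 h2
        omega
    have hc1 : (PySem.List.enumerate xs (s+1)).countP (fun q => q.2 - q.1 == x - s)
        = ((PySem.List.enumerate xs (s+1)).map (fun p => p.2 - p.1)).count (x - s) := by
      rw [List.count, List.countP_map]
      rfl
    have hc2 : (PySem.List.enumerate xs (s+1)).countP (fun q => q.2 + q.1 == x + s)
        = ((PySem.List.enumerate xs (s+1)).map (fun p => p.2 + p.1)).count (x + s) := by
      rw [List.count, List.countP_map]
      rfl
    rw [hsplit, hc1, hc2, ih (s+1)]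
    show _ = ((PySem.List.enumerate xs (s+1)).map (fun p => p.2 - p.1)).count (x - s) + pcEq _
      + (((PySem.List.enumerate xs (s+1)).map (fun p => p.2 + p.1)).count (x + s) + pcEq _)
    omega


lemma floordiv_C2 (m : Nat) :
    PySem.Int.floordiv ((m : Int) * ((m : Int) - 1)) 2 = (C2n m : Int) := by
  cases m with
  | zero => decide
  | succ k =>
    have h : ((k+1 : Nat) : Int) * (((k+1 : Nat) : Int) - 1) = (((k+1) * k : Nat) : Int) := by
      push_cast; ring
    rw [h, show (2:Int) = ((2:Nat):Int) from rfl, PySem.Int.floordiv_natCast]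
    congr 1


lemma sum_over (keys : List Int) : ∀ S : List Int, S.Nodup → (∀ k, k ∈ S ↔ k ∈ keys) →
    (S.map (fun k => C2n (keys.count k))).sum = pcEq keys := by
  induction keys with
  | nil =>
    intro S hnd hmem
    have : S = [] := List.eq_nil_iff_forall_not_mem.2 (fun a ha => by simpa using (hmem a).1 ha)
    simp [this, pcEq]
  | cons x t ih =>
    intro S hnd hmem
    have hxS : x ∈ S := (hmem x).2 (by simp)
    have hperm : S.Perm (x :: S.erase x) := List.perm_cons_erase hxS
    have hsum : (S.map (fun k => C2n ((x :: t).count k))).sum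
        = C2n ((x :: t).count x) + ((S.erase x).map (fun k => C2n ((x :: t).count k))).sum := by
      rw [(hperm.map (fun k => C2n ((x :: t).count k))).sum_eq]
      simp
    have hxnot : x ∉ S.erase x := hnd.not_mem_erase
    have hcongr : ((S.erase x).map (fun k => C2n ((x :: t).count k)))
        = ((S.erase x).map (fun k => C2n (t.count k))) := by
      apply List.map_congr_left
      intro a ha
      have hax : a ≠ x := fun hax => hxnot (hax ▸ ha)
      simp [hax.symm]
    have hcx : (x :: t).count x = t.count x + 1 := by rw [List.count_cons_self]
    by_cases hxt : x ∈ t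
    · -- use IH with S itself
      have hS : (S.map (fun k => C2n (t.count k))).sum = pcEq t := by
        apply ih S hnd
        intro k
        rw [hmem k]
        simp only [List.mem_cons]
        constructor
        · rintro (rfl | h)
          · exact hxt
          · exact h
        · exact Or.inr
      have hsum2 : (S.map (fun k => C2n (t.count k))).sum
          = C2n (t.count x) + ((S.erase x).map (fun k => C2n (t.count k))).sum := by
        rw [(hperm.map (fun k => C2n (t.count k))).sum_eq]
        simp
      show (S.map (fun k => C2n ((x :: t).count k))).sum = t.count x + pcEq t
      rw [hsum, hcongr, hcx, C2n_succ]
      omega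
    · have hc0 : t.count x = 0 := List.count_eq_zero.2 hxt
      have hS : ((S.erase x).map (fun k => C2n (t.count k))).sum = pcEq t := by
        apply ih (S.erase x) (hnd.erase x)
        intro k
        rw [List.Nodup.mem_erase_iff hnd, hmem k]
        simp only [List.mem_cons]
        constructor
        · rintro ⟨hkx, rfl | h⟩
          · exact absurd rfl hkx
          · exact h
        · intro h
          exact ⟨fun hkx => hxt (hkx ▸ h), Or.inr h⟩
      show (S.map (fun k => C2n ((x :: t).count k))).sum = t.count x + pcEq t
      rw [hsum, hcongr, hcx, hc0, hS]
      have hC : C2n (0 + 1) = 0 := rfl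
      omega


lemma pvC2Sum_eq (c : Int) (keys : List Int) : pvC2Sum c keys = c + (pcEq keys : Int) := by
  show ((keys.foldl (fun d k => d.insert k (d.getD k 0 + 1)) PySem.Dict.empty).values).foldl
      (fun c v => c + PySem.Int.floordiv (v * (v - 1)) 2) c = c + (pcEq keys : Int)
  rw [PySem.Dict.foldl_insert_getD_add_one_eq_counter]
  rw [show (PySem.Dict.counter keys).values = (PySem.Dict.counter keys).items.map (·.2) from rfl]
  rw [PySem.Dict.items_counter, List.map_map]
  rw [PySem.List.foldl_add _ (fun v => PySem.Int.floordiv (v * (v - 1)) 2) c, List.map_map]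
  congr 1
  have hmap : (PySem.Set.ofList keys).map
      ((fun v => PySem.Int.floordiv (v * (v - 1)) 2) ∘ ((·.2) ∘ fun k => (k, ((keys.count k : Nat) : Int))))
      = (PySem.Set.ofList keys).map (fun k => ((C2n (keys.count k) : Nat) : Int)) := by
    apply List.map_congr_left
    intro a _
    show PySem.Int.floordiv ((keys.count a : Int) * ((keys.count a : Int) - 1)) 2 = _
    rw [floordiv_C2]
  rw [hmap, show (fun k => ((C2n (keys.count k) : Nat) : Int)) = (Nat.cast ∘ fun k => C2n (keys.count k)) from rfl,
     ← List.map_map, ← Nat.cast_list_sum]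
  rw [sum_over keys (PySem.Set.ofList keys) (PySem.Set.nodup_ofList keys)
      (PySem.Set.mem_ofList keys)]


-- ===== VERDICT (by name: the statement is the Claim_ definition above) =====
theorem getFitness_spec : Claim_equal_getFitness := by
  intro xs _
  unfold Spec_getFitness
  have b1 : ∀ c0 : Int,
      (PySem.List.pyRange 0 (PySem.List.len xs - 1) 1).foldl (fun c i =>
        (PySem.List.pyRange (i + 1) (PySem.List.len xs) 1).foldl (fun c j =>
          if PySem.List.pyGetD xs i 0 == PySem.List.pyGetD xs j 0 then c + 1 else c) c) c0
      = c0 + (pcR (fun p q => p.2 == q.2) (PySem.List.enumerate xs 0) : Int) :=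
    fun c0 => bridge xs (fun p q => p.2 == q.2) xs.length 0 c0 (by omega)
  have b2 : ∀ c0 : Int,
      (PySem.List.pyRange 0 (PySem.List.len xs - 1) 1).foldl (fun c i =>
        (PySem.List.pyRange (i + 1) (PySem.List.len xs) 1).foldl (fun c j =>
          if |PySem.List.pyGetD xs j 0 - PySem.List.pyGetD xs i 0| == |j - i| then c + 1 else c) c) c0
      = c0 + (pcR (fun p q => |q.2 - p.2| == |q.1 - p.1|) (PySem.List.enumerate xs 0) : Int) :=
    fun c0 => bridge xs (fun p q => |q.2 - p.2| == |q.1 - p.1|) xs.length 0 c0 (by omega)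
  show getFitness xs = getFitness_alt xs
  unfold getFitness getFitness_alt
  simp only [List.foldl_cons, List.foldl_nil]
  rw [b1, b2, pvC2Sum_eq, pvC2Sum_eq, pvC2Sum_eq,
    pcR_eq_eq_pcEq xs 0, pcR_diag_eq xs 0]
  push_cast
  ring
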